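-- pv_equiv track=rewrite | github.com/THU-KEG/OmniEvent | scripts/data_processing/wikievents/wikievents.py | token_pos_to_char_pos
-- ===== SOURCE A (Python) =====
-- from typing import Dict, List, Tuple, Union
--
-- def token_pos_to_char_pos(tokens: List[str],
--                           token_pos: List[int]) -> List[int]:
--     """Converts the token-level position of a mention into character-level.
--
--     Converts the token-level position of a mention into character-level by counting the number of characters before the
--     start position of the mention. The end position could then be derived by adding the character-level start position
--     and the length of the mention's span.
--
--     Args:
--         tokens (`List[str]`):
--             A list of strings representing the tokens within the source text.
--         token_pos (`List[int]`):
--             A list of integers indicating the word-level start and end position of the mention.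
--
--     Returns:
--         A list of integers representing the character-level start and end position of the mention.
--     """
--     word_span = " ".join(tokens[token_pos[0]:token_pos[1]])
--     char_start, char_end = -1, -1
--     curr_pos = 0
--     for i, token in enumerate(tokens):
--         if i == token_pos[0]:
--             char_start = curr_pos
--             break
--         curr_pos += len(token) + 1
--     assert char_start != -1
--     char_end = char_start + len(word_span)
--     sen = " ".join(tokens)
--     assert sen[char_start:char_end] == word_span
--     return [char_start, char_end]
-- ===== SOURCE B (Python) =====
-- def token_pos_to_char_pos(tokens, token_pos):
--     """Closed-form version: character start = length of the joined prefix (+1 for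
--     the separator when the mention does not start the sentence)."""
--     start, end = token_pos[0], token_pos[1]
--     assert 0 <= start < len(tokens)
--     char_start = len(" ".join(tokens[:start])) + (1 if start else 0)
--     char_end = char_start + len(" ".join(tokens[start:end]))
--     return [char_start, char_end]
-- ===== Notes on version B (the rewrite author's own statement) =====
-- stated objective: simpler
-- what changed: Replaces A's early-breaking enumerate/accumulator loop (and its sentinel -1 plus the final slice-check assert) by a closed-form character start: the length of the space-joined token prefix plus one separator, with an explicit range assert.
import Mathlib
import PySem

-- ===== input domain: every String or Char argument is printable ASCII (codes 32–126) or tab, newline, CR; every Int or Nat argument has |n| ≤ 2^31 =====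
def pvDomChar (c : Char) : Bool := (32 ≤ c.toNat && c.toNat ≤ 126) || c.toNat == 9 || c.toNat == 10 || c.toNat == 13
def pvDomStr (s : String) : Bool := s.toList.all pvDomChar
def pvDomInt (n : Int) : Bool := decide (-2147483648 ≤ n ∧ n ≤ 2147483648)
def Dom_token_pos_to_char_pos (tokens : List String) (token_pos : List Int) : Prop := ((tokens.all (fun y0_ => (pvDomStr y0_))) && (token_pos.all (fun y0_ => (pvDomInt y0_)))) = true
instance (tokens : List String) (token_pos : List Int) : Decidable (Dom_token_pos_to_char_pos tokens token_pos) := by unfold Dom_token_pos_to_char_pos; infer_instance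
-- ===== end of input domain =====

-- B replaces A's early-breaking accumulator loop by the closed-form length of the space-joined prefix (objective: simpler).

-- ===== PORT A =====
-- A's loop 'for i, token in enumerate(tokens): if i == token_pos[0]: char_start = curr_pos; break;
-- curr_pos += len(token) + 1' (result -1 = char_start's initial value when the break never fires).
def pvALoop : List String → Int → Int → Int → Int
  | [], _, _, _ => -1
  | t :: rest, i, p0, curr =>
    if i = p0 then curr else pvALoop rest (i + 1) p0 (curr + PySem.Str.len t + 1)

def token_pos_to_char_pos (tokens : List String) (token_pos : List Int) : List Int :=
  match PySem.List.pyGet? token_pos 0, PySem.List.pyGet? token_pos 1 with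
  | some p0, some p1 =>
    let word_span := PySem.Str.join " " (PySem.List.slice tokens (some p0) (some p1))
    let char_start := pvALoop tokens 0 p0 0
    if char_start = -1 then []  -- 'assert char_start != -1' fails: AssertionError (excluded by Pre_)
    else
      let char_end := char_start + PySem.Str.len word_span
      let sen := PySem.Str.join " " tokens
      if PySem.Str.slice sen (some char_start) (some char_end) = word_span then
        [char_start, char_end]
      else []  -- second assert fails: AssertionError (proved unreachable under Pre_)
  | _, _ => []  -- token_pos[0] / token_pos[1]: IndexError (excluded by Pre_)

-- ===== PORT B =====
def token_pos_to_char_pos_alt (tokens : List String) (token_pos : List Int) : List Int :=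
  match PySem.List.pyGet? token_pos 0 with
  | none => []  -- IndexError (excluded by Pre_)
  | some start =>
    match PySem.List.pyGet? token_pos 1 with
    | none => []  -- IndexError (excluded by Pre_)
    | some stop =>
      if 0 ≤ start ∧ start < PySem.List.len tokens then
        let char_start := PySem.Str.len (PySem.Str.join " " (PySem.List.slice tokens none (some start)))
                            + (if start = 0 then 0 else 1)
        let char_end := char_start + PySem.Str.len (PySem.Str.join " " (PySem.List.slice tokens (some start) (some stop)))
        [char_start, char_end]
      else []  -- 'assert 0 <= start < len(tokens)' fails: AssertionError (excluded by Pre_)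

-- ===== PRECONDITION & SPEC =====
-- Pre_ excludes exactly the inputs on which A raises: token_pos with fewer than two entries (IndexError on
-- token_pos[0]/token_pos[1]) and a first entry outside [0, len(tokens)) (the 'assert char_start != -1' AssertionError).
def Pre_token_pos_to_char_pos (tokens : List String) (token_pos : List Int) : Prop :=
  2 ≤ token_pos.length ∧ 0 ≤ token_pos.getD 0 0 ∧ token_pos.getD 0 0 < tokens.length

instance (tokens : List String) (token_pos : List Int) : Decidable (Pre_token_pos_to_char_pos tokens token_pos) := by
  unfold Pre_token_pos_to_char_pos; infer_instance

def pvWitness_token_pos_to_char_pos : List String × List Int := (["The", "big", "dog"], [1, 3])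

def Spec_token_pos_to_char_pos (tokens : List String) (token_pos : List Int) (out : List Int) : Prop := out = token_pos_to_char_pos_alt tokens token_pos
instance (tokens : List String) (token_pos : List Int) (out : List Int) : Decidable (Spec_token_pos_to_char_pos tokens token_pos out) := by unfold Spec_token_pos_to_char_pos; infer_instance

-- ===== CLAIM (what is proved, stated in full; the proofs are below) =====
def Claim_equal_token_pos_to_char_pos : Prop := ∀ (tokens : List String) (token_pos : List Int), Dom_token_pos_to_char_pos tokens token_pos → Pre_token_pos_to_char_pos tokens token_pos → Spec_token_pos_to_char_pos tokens token_pos (token_pos_to_char_pos tokens token_pos)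

-- ===== LEMMAS AND PROOFS =====

-- PySem.List.slice on two explicit bounds, unfolded to its clamped drop/take form.
theorem pv_slice_clamp {α : Type} (xs : List α) (a b : Int) :
    PySem.List.slice xs (some a) (some b) =
      (xs.drop (PySem.List.clampIdx xs.length a)).take
        (PySem.List.clampIdx xs.length b - PySem.List.clampIdx xs.length a) := rfl

theorem pv_join_cons (sep : List Char) (a : List Char) (l : List (List Char)) (h : l ≠ []) :
    PySem.Chars.join sep (a :: l) = a ++ sep ++ PySem.Chars.join sep l := by
  cases l with
  | nil => exact absurd rfl h
  | cons b t => exact PySem.Chars.join_cons_cons sep a b t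

theorem pv_join_split (m : List (List Char)) (n : Nat) (h : n < m.length) :
    PySem.Chars.join [' '] m =
      PySem.Chars.join [' '] (m.take n) ++ (if n = 0 then [] else [' ']) ++
        PySem.Chars.join [' '] (m.drop n) := by
  induction n generalizing m with
  | zero => simp [PySem.Chars.join_nil]
  | succ n ih =>
    cases m with
    | nil => simp at h
    | cons a rest =>
      have hrest : rest ≠ [] := by
        rintro rfl; simp at h
      have hlt : n < rest.length := by simpa using h
      rw [pv_join_cons [' '] a rest hrest]
      simp only [List.take_succ_cons, List.drop_succ_cons, Nat.succ_ne_zero, if_false]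
      by_cases hn : n = 0
      · subst hn
        simp [PySem.Chars.join_singleton]
      · have htk : rest.take n ≠ [] := by
          intro he
          have := congrArg List.length he
          rw [List.length_take, List.length_nil] at this
          omega
        rw [pv_join_cons [' '] a (rest.take n) htk, ih rest hlt, if_neg hn]
        simp [List.append_assoc]

theorem pv_join_prefix (m : List (List Char)) (k : Nat) :
    PySem.Chars.join [' '] (m.take k) <+: PySem.Chars.join [' '] m := by
  induction m generalizing k with
  | nil => simp
  | cons a t ih =>
    cases k with
    | zero => simp [PySem.Chars.join_nil]
    | succ k =>
      cases ht : t with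
      | nil => simp [PySem.Chars.join_singleton]
      | cons b s =>
        rw [← ht]
        have htne : t ≠ [] := by simp [ht]
        rw [List.take_succ_cons, pv_join_cons [' '] a t htne]
        by_cases hk : t.take k = []
        · rw [hk, PySem.Chars.join_singleton]
          exact ⟨[' '] ++ PySem.Chars.join [' '] t, by simp⟩
        · rw [pv_join_cons [' '] a (t.take k) hk]
          obtain ⟨r, hr⟩ := ih k
          exact ⟨r, by simp [List.append_assoc, hr]⟩

theorem pv_sum_take (tokens : List String) (n : Nat) (h1 : 1 ≤ n) (h2 : n ≤ tokens.length) :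
    ((tokens.take n).map (fun t => PySem.Str.len t + 1)).sum =
      ((PySem.Chars.join [' '] ((tokens.map String.toList).take n)).length : Int) + 1 := by
  induction tokens generalizing n with
  | nil => rw [List.length_nil] at h2; omega
  | cons t rest ih =>
    obtain ⟨m, rfl⟩ : ∃ m, n = m + 1 := ⟨n - 1, by omega⟩
    simp only [List.map_cons, List.take_succ_cons, List.sum_cons]
    by_cases hm : m = 0
    · subst hm
      simp [PySem.Chars.join_singleton, PySem.Str.len_eq]
    · have hm1 : 1 ≤ m := by omega
      have hm2 : m ≤ rest.length := by rw [List.length_cons] at h2; omega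
      have htk : (rest.map String.toList).take m ≠ [] := by
        intro he
        have := congrArg List.length he
        rw [List.length_take, List.length_map, List.length_nil] at this
        omega
      rw [pv_join_cons [' '] t.toList _ htk, ih m hm1 hm2]
      simp [PySem.Str.len_eq]
      ring

theorem pv_loop_eq (ts : List String) (n : Nat) (i curr : Int) (h : n < ts.length) :
    pvALoop ts i (i + (n : Int)) curr =
      curr + ((ts.take n).map (fun t => PySem.Str.len t + 1)).sum := by
  induction n generalizing ts i curr with
  | zero =>
    cases ts with
    | nil => simp at h
    | cons t rest => simp [pvALoop]
  | succ n ih =>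
    cases ts with
    | nil => simp at h
    | cons t rest =>
      have hne : ¬ (i = i + ((n : Int) + 1)) := by omega
      have : i + ((n : Int) + 1) = (i + 1) + (n : Int) := by ring
      simp only [pvALoop, Nat.cast_add, Nat.cast_one, this]
      rw [ih rest (i+1) _ (by simpa using h)]
      simp only [List.take_succ_cons, List.map_cons, List.sum_cons]
      rw [if_neg (by omega)]
      ring

theorem pv_main (tokens : List String) (token_pos : List Int)
    (hpre : 2 ≤ token_pos.length ∧ 0 ≤ token_pos.getD 0 0 ∧ token_pos.getD 0 0 < tokens.length) :
    token_pos_to_char_pos tokens token_pos = token_pos_to_char_pos_alt tokens token_pos := by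
  obtain ⟨hlen2, h0, h1⟩ := hpre
  match token_pos with
  | [] => simp at hlen2
  | [_] => simp at hlen2
  | a :: p1 :: rest =>
  simp only [List.getD_cons_zero] at h0 h1
  have hnn : (0:Int) ≤ (rest.length : Int) + 1 := by omega
  have hget0 : PySem.List.pyGet? (a :: p1 :: rest) (0 : Int) = some a := by
    simp [PySem.List.pyGet?, PySem.List.pyIdx?, hnn]
  have hget1 : PySem.List.pyGet? (a :: p1 :: rest) (1 : Int) = some p1 := by
    simp [PySem.List.pyGet?, PySem.List.pyIdx?]
  obtain ⟨n, rfl⟩ : ∃ n : Nat, a = (n : Int) := ⟨a.toNat, (Int.toNat_of_nonneg h0).symm⟩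
  have hn : n < tokens.length := by exact_mod_cast h1
  set L := tokens.map String.toList with hL
  have hLlen : L.length = tokens.length := by simp [hL]
  -- the word span, shared by both ports
  have hsp : " ".toList = [' '] := by decide
  have hclampn : PySem.List.clampIdx tokens.length (n : Int) = n := by
    rw [PySem.List.clampIdx_natCast]; omega
  set k := PySem.List.clampIdx tokens.length p1 - n with hk
  have hslice : PySem.List.slice tokens (some (n : Int)) (some p1) = (tokens.drop n).take k := by
    rw [pv_slice_clamp, hclampn, hk]
  set ws := PySem.Str.join " " (PySem.List.slice tokens (some (n : Int)) (some p1)) with hws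
  have hwsL : ws.toList = PySem.Chars.join [' '] ((L.drop n).take k) := by
    rw [hws, PySem.Str.toList_join, hsp, hslice, hL, List.map_take, List.map_drop]
  -- char_start agreement
  have hcsB : PySem.Str.len (PySem.Str.join " " (PySem.List.slice tokens none (some (n : Int))))
        + (if (n : Int) = 0 then 0 else 1)
      = ((PySem.Chars.join [' '] (L.take n)).length : Int) + (if n = 0 then 0 else 1) := by
    rw [PySem.List.slice_to tokens (b := (n : Int)) (by omega), PySem.Str.len_eq, PySem.Str.toList_join, hsp]
    simp only [Int.toNat_natCast, hL, List.map_take]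
    congr 1
    by_cases hn0 : n = 0 <;> simp [hn0]
  have hloop : pvALoop tokens 0 (n : Int) 0
      = ((PySem.Chars.join [' '] (L.take n)).length : Int) + (if n = 0 then 0 else 1) := by
    have := pv_loop_eq tokens n 0 0 hn
    rw [zero_add] at this
    rw [this, zero_add]
    by_cases hn0 : n = 0
    · simp [hn0, PySem.Chars.join_nil]
    · rw [pv_sum_take tokens n (by omega) hn.le, if_neg hn0, hL]
  set cs : Int := ((PySem.Chars.join [' '] (L.take n)).length : Int) + (if n = 0 then 0 else 1) with hcs
  have hcs0 : 0 ≤ cs := by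
    rw [hcs]; by_cases hn0 : n = 0 <;> simp [hn0]; positivity
  -- the final assert holds
  have hassert : PySem.Str.slice (PySem.Str.join " " tokens) (some cs) (some (cs + PySem.Str.len ws)) = ws := by
    rw [← String.toList_inj, PySem.Str.toList_slice, PySem.Chars.slice_eq_listSlice]
    have hwslen : PySem.Str.len ws = (ws.toList.length : Int) := PySem.Str.len_eq ws
    have hce0 : 0 ≤ cs + PySem.Str.len ws := by rw [hwslen]; omega
    rw [PySem.List.slice_toNat _ hcs0 hce0, hwsL]
    have htn : (cs + PySem.Str.len ws).toNat - cs.toNat = ws.toList.length := by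
      rw [hwslen]; omega
    rw [htn, hwsL]
    have hsplit := pv_join_split L n (by omega)
    have hcstn : cs.toNat = (PySem.Chars.join [' '] (L.take n)).length
        + (if n = 0 then ([] : List Char) else [' ']).length := by
      rw [hcs]; by_cases hn0 : n = 0 <;> simp [hn0]
    rw [PySem.Str.toList_join, hsp, ← hL, hsplit, hcstn, ← List.length_append,
      List.drop_left]
    obtain ⟨r, hr⟩ := pv_join_prefix (L.drop n) k
    rw [← hr, List.take_left]
  -- put it together
  simp only [token_pos_to_char_pos, token_pos_to_char_pos_alt, hget0, hget1]
  rw [hloop, ← hws, hcsB, if_neg (show ¬ (cs = -1) by omega), if_pos hassert,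
    if_pos ⟨h0, by rw [PySem.List.len_eq]; exact h1⟩]

-- ===== VERDICT (by name: the statement is the Claim_ definition above) =====
theorem token_pos_to_char_pos_spec : Claim_equal_token_pos_to_char_pos := by
  intro tokens token_pos _ hpre
  unfold Spec_token_pos_to_char_pos
  exact pv_main tokens token_pos hpre
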